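-- pv_equiv track=rewrite | github.com/chien-kieu/hit137-group-assignment-2 | question_2_chapter_2.py | separate_and_convert
-- ===== SOURCE A (Python) =====
-- def separate_and_convert(input_string):
--     """
--     Separates an input string into number and letter components.
--     Converts even numbers to ASCII code decimal values and upper-case letters to ASCII code decimal values.
--
--     Parameters:
--     - input_string (str): The input string containing alphanumeric characters.
--
--     Returns:
--     - number_string (str): String containing only the numeric characters from the input.
--     - letter_string (str): String containing only the alphabetic characters from the input.
--     - even_numbers (list): List of even numeric characters extracted from the number string.
--     - ascii_values_numbers (list): List of ASCII code decimal values corresponding to even_numbers.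
--     - upper_case_letters (list): List of upper-case alphabetic characters extracted from the letter string.
--     - ascii_values_letters (list): List of ASCII code decimal values corresponding to upper_case_letters.
--     """
--     # Separate numbers and letters
--     number_string = ''.join([char for char in input_string if char.isdigit()])
--     letter_string = ''.join([char for char in input_string if char.isalpha()])
--
--     # Extract even numbers from the number string
--     even_numbers = [int(char) for char in number_string if int(char) % 2 == 0]
--
--     # Convert even numbers to ASCII Code Decimal Values
--     ascii_even_numbers = [ord(str(number)) for number in even_numbers]
--
--     # Extract upper-case letters from the letter string
--     upper_case_letters = [char for char in letter_string if char.isupper()]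
--
--     # Convert upper-case letters to ASCII Code Decimal Values
--     ascii_upper_case_letters = [ord(char) for char in upper_case_letters]
--
--     return number_string, letter_string, even_numbers, ascii_even_numbers, upper_case_letters, ascii_upper_case_letters
-- ===== SOURCE B (Python) =====
-- def separate_and_convert(input_string):
--     """Single fused pass over the input instead of six chained passes over derived strings/lists."""
--     number_chars = []
--     letter_chars = []
--     even_numbers = []
--     ascii_even_numbers = []
--     upper_case_letters = []
--     ascii_upper_case_letters = []
--     for char in input_string:
--         if char.isdigit():
--             number_chars.append(char)
--             value = int(char)
--             if value % 2 == 0: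
--                 even_numbers.append(value)
--                 ascii_even_numbers.append(ord(char))
--         elif char.isalpha():
--             letter_chars.append(char)
--             if char.isupper():
--                 upper_case_letters.append(char)
--                 ascii_upper_case_letters.append(ord(char))
--     return (''.join(number_chars), ''.join(letter_chars), even_numbers,
--             ascii_even_numbers, upper_case_letters, ascii_upper_case_letters)
-- ===== Notes on version B (the rewrite author's own statement) =====
-- stated objective: alternative
-- what changed: Collapses A's six chained passes (two filtering comprehensions over the string, then comprehensions over the derived number/letter strings and over the extracted lists) into one loop over the input that classifies each character once and appends to all six results directly.
import Mathlib
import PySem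

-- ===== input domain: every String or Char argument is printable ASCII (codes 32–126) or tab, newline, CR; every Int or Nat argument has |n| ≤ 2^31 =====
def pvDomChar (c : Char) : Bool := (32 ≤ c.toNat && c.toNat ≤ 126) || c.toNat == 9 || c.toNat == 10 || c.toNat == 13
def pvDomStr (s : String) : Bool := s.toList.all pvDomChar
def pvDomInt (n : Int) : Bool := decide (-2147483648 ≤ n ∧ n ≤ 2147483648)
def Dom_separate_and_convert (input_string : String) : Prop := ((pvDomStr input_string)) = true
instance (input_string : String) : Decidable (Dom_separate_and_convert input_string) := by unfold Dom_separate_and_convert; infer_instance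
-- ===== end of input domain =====

-- B replaces A's six chained passes over derived strings/lists by one fused loop over the input; return values coincide.

-- ===== PORT A =====
-- int(char) for a single ASCII digit character (exact there; only chars passing isdigit reach it)
def pvDigitVal (c : Char) : Int := (c.toNat : Int) - 48
-- ord(str(number)) for an int: code point of the first character of str(number)
def pvOrdOfToStr (n : Int) : Int := (((PySem.Int.toChars n).headD ' ').toNat : Int)

def separate_and_convert (input_string : String) : String × String × List Int × List Int × List String × List Int :=
  let number_chars := input_string.toList.filter (fun c => PySem.Chars.isdigit c)
  let number_string := String.ofList number_chars          -- ''.join([char … if char.isdigit()])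
  let letter_chars := input_string.toList.filter (fun c => PySem.Chars.isalpha c)
  let letter_string := String.ofList letter_chars          -- ''.join([char … if char.isalpha()])
  let even_numbers := (number_chars.filter (fun c => PySem.Int.mod (pvDigitVal c) 2 == 0)).map pvDigitVal
  let ascii_even_numbers := even_numbers.map pvOrdOfToStr
  let upper_case_letters := (letter_chars.filter (fun c => PySem.Chars.isupper c)).map (fun c => String.ofList [c])
  let ascii_upper_case_letters := upper_case_letters.map (fun s => ((s.toList.headD ' ').toNat : Int))
  (number_string, letter_string, even_numbers, ascii_even_numbers, upper_case_letters, ascii_upper_case_letters)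

-- ===== PORT B =====
def pvStepB (st : List Char × List Char × List Int × List Int × List String × List Int) (c : Char) :
    List Char × List Char × List Int × List Int × List String × List Int :=
  let (nc, lc, ev, ae, up, au) := st
  if PySem.Chars.isdigit c then
    let v := pvDigitVal c
    if PySem.Int.mod v 2 == 0 then (nc ++ [c], lc, ev ++ [v], ae ++ [(c.toNat : Int)], up, au)
    else (nc ++ [c], lc, ev, ae, up, au)
  else if PySem.Chars.isalpha c then
    if PySem.Chars.isupper c then (nc, lc ++ [c], ev, ae, up ++ [String.ofList [c]], au ++ [(c.toNat : Int)])
    else (nc, lc ++ [c], ev, ae, up, au)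
  else st

def separate_and_convert_alt (input_string : String) : String × String × List Int × List Int × List String × List Int :=
  let (nc, lc, ev, ae, up, au) := input_string.toList.foldl pvStepB ([], [], [], [], [], [])
  (String.ofList nc, String.ofList lc, ev, ae, up, au)

-- ===== PRECONDITION & SPEC =====
def Spec_separate_and_convert (input_string : String) (out : String × String × List Int × List Int × List String × List Int) : Prop := out = separate_and_convert_alt input_string
instance (input_string : String) (out : String × String × List Int × List Int × List String × List Int) : Decidable (Spec_separate_and_convert input_string out) := by unfold Spec_separate_and_convert; infer_instance

-- ===== CLAIM (what is proved, stated in full; the proofs are below) =====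
def Claim_equal_separate_and_convert : Prop := ∀ (input_string : String), Dom_separate_and_convert input_string → Spec_separate_and_convert input_string (separate_and_convert input_string)

-- ===== LEMMAS AND PROOFS =====

lemma pv_digit_not_alpha (c : Char) (h : PySem.Chars.isdigit c = true) :
    PySem.Chars.isalpha c = false := by
  simp only [PySem.Chars.isdigit, Bool.and_eq_true, decide_eq_true_eq] at h
  simp only [PySem.Chars.isalpha, PySem.Chars.isupper, PySem.Chars.islower,
    Bool.or_eq_false_iff, Bool.and_eq_false_iff, decide_eq_false_iff_not]
  constructor
  · left; intro hc; exact absurd (le_trans hc h.2) (by decide)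
  · left; intro hc; exact absurd (le_trans hc h.2) (by decide)

lemma pv_ord_digit (c : Char) (h : PySem.Chars.isdigit c = true) :
    pvOrdOfToStr (pvDigitVal c) = (c.toNat : Int) := by
  simp only [PySem.Chars.isdigit, Bool.and_eq_true, decide_eq_true_eq, Char.le_def] at h
  have h1 : 48 ≤ c.toNat := h.1
  have h2 : c.toNat ≤ 57 := h.2
  unfold pvOrdOfToStr pvDigitVal
  congr 1
  generalize c.toNat = n at h1 h2 ⊢
  interval_cases n <;> decide

lemma pv_foldB_spec (cs : List Char) (nc lc : List Char) (ev ae : List Int)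
    (up : List String) (au : List Int) :
    cs.foldl pvStepB (nc, lc, ev, ae, up, au) =
      (nc ++ cs.filter (fun c => PySem.Chars.isdigit c),
       lc ++ cs.filter (fun c => PySem.Chars.isalpha c),
       ev ++ ((cs.filter (fun c => PySem.Chars.isdigit c)).filter
                (fun c => PySem.Int.mod (pvDigitVal c) 2 == 0)).map pvDigitVal,
       ae ++ (((cs.filter (fun c => PySem.Chars.isdigit c)).filter
                (fun c => PySem.Int.mod (pvDigitVal c) 2 == 0)).map pvDigitVal).map pvOrdOfToStr,
       up ++ ((cs.filter (fun c => PySem.Chars.isalpha c)).filter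
                (fun c => PySem.Chars.isupper c)).map (fun c => String.ofList [c]),
       au ++ (((cs.filter (fun c => PySem.Chars.isalpha c)).filter
                (fun c => PySem.Chars.isupper c)).map (fun c => String.ofList [c])).map
                (fun s => ((s.toList.headD ' ').toNat : Int))) := by
  induction cs generalizing nc lc ev ae up au with
  | nil => simp
  | cons c cs ih =>
    simp only [List.foldl_cons]
    by_cases hd : PySem.Chars.isdigit c = true
    · have ha := pv_digit_not_alpha c hd
      by_cases he : (2 : Int) ∣ pvDigitVal c
      · simp [pvStepB, hd, he, ha, ih, pv_ord_digit c hd]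
      · simp [pvStepB, hd, he, ha, ih]
    · simp only [Bool.not_eq_true] at hd
      by_cases hA : PySem.Chars.isalpha c = true
      · by_cases hu : PySem.Chars.isupper c = true
        · simp [pvStepB, hd, hA, hu, ih]
        · simp only [Bool.not_eq_true] at hu
          simp [pvStepB, hd, hA, hu, ih]
      · simp only [Bool.not_eq_true] at hA
        simp [pvStepB, hd, hA, ih]

-- ===== VERDICT (by name: the statement is the Claim_ definition above) =====
theorem separate_and_convert_spec : Claim_equal_separate_and_convert := by
  intro s _
  show separate_and_convert s = separate_and_convert_alt s
  unfold separate_and_convert separate_and_convert_alt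
  rw [pv_foldB_spec]
  simp
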